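-- pv_equiv track=rewrite | github.com/Shunikai972/BUT1 | SAEMATHFINAL/M'SAKNI Noam/modele.py | creer_grille_final
-- ===== SOURCE A (Python) =====
-- def creer_grille_final(list_var,n):
--     N = n*n
--     grille = [0] * (N*N)
--     for idx, val in enumerate(list_var):
--         if val is True :
--             k = (idx % N) + 1
--             j = (idx // N) % N + 1
--             i = (idx // (N*N)) + 1
--             grille[(i-1)*N + (j-1)] = k
--     return grille
--     '''
--     Renvoie : une liste (list_grille_complete) avec les valeurs qui devront s'afficher dans la grille (en fonction des valeurs logiques prises par les variables de list_var) en la parcourant ligne après ligne de haut en bas et de gauche à droite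
-- '''
-- ===== SOURCE B (Python) =====
-- def creer_grille_final(list_var, n):
--     # Gather per cell instead of scattering decoded writes: each grid cell's value
--     # is the last True variable among its N slots; cells whose slots lie wholly
--     # beyond the variable list are zero and are emitted as one zero tail.
--     N = n * n
--     ncells = N * N
--     L = len(list_var)
--     grille = []
--     cell = 0
--     while cell < ncells and cell * N < L:
--         base = cell * N
--         v = 0
--         for k in range(1, min(N, L - base) + 1):
--             if list_var[base + k - 1]:
--                 v = k
--         grille.append(v)
--         cell += 1
--     grille.extend([0] * (ncells - cell))
--     return grille
-- ===== Notes on version B (the rewrite author's own statement) =====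
-- stated objective: alternative
-- what changed: B enumerates grid cells forward and gathers each cell's value as the last True variable among that cell's N slots (emitting the all-zero tail of unoccupied cells in one step), instead of A's single flat pass that decodes every variable index backward and scatters writes into a mutable grid.
-- crash fix: On inputs whose grid fits in a Python list but with a True variable at flat index >= N^3 (or any True when N = n*n = 0) A raises IndexError resp. ZeroDivisionError, while B simply ignores variables outside the grid and returns the decoded N^2 grid. — e.g. on creer_grille_final([true], 0): A raises ZeroDivisionError, B returns []
import Mathlib
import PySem

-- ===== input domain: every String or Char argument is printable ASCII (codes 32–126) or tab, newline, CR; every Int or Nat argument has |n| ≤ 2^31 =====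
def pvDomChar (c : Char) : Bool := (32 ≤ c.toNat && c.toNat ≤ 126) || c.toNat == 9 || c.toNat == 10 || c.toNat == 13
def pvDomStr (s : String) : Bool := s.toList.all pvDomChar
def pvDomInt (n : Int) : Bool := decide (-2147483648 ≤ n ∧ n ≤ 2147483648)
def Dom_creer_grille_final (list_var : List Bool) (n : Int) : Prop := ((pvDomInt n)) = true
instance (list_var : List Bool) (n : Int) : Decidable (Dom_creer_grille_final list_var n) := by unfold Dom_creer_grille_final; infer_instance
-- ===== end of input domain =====

-- B gathers each grid cell's value directly (last true variable in its N-segment)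
-- instead of A's scatter of decoded flat indices; objective: simpler decomposition.


-- ===== PORT A =====
-- loop body of A's `for idx, val in enumerate(list_var)` (named so the proofs can cite it)
def pvStepA (N : Int) (g : List Int) (p : Int × Bool) : List Int :=
  if p.2 = true then
    let idx := p.1
    let k := PySem.Int.mod idx N + 1
    let j := PySem.Int.mod (PySem.Int.floordiv idx N) N + 1
    let i := PySem.Int.floordiv idx (N * N) + 1
    g.set ((i - 1) * N + (j - 1)).toNat k
  else g

def creer_grille_final (list_var : List Bool) (n : Int) : List Int :=
  let N := n * n
  (PySem.List.enumerate list_var).foldl (pvStepA N) (List.replicate (N * N).toNat 0)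

-- ===== PORT B =====
-- B's while loop over cells: emits occupied cells front-to-back, then the zero tail
def pvBLoop (list_var : List Bool) (N L : Int) (cell : Nat) (remaining : Nat) : List Int :=
  match remaining with
  | 0 => []
  | r + 1 =>
      if (cell : Int) * N < L then
        ((PySem.List.pyRange 1 (min N (L - (cell : Int) * N) + 1)).foldl
          (fun v k => if PySem.List.pyGetD list_var ((cell : Int) * N + k - 1) false then k else v) 0)
          :: pvBLoop list_var N L (cell + 1) r
      else List.replicate (r + 1) 0

def creer_grille_final_alt (list_var : List Bool) (n : Int) : List Int :=
  let N := n * n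
  let L : Int := (list_var.length : Int)
  pvBLoop list_var N L 0 (N * N).toNat

-- ===== PRECONDITION & SPEC =====
-- Pre_ excludes exactly the inputs where Python A raises: a True at a flat index ≥ N^3
-- makes A's grille write go out of range (IndexError), and any True with N = 0 hits
-- `idx % 0` (ZeroDivisionError).  A returns normally on every input admitted here.
-- The last conjunct excludes inputs where CPython raises OverflowError before the loop:
-- `[0] * (N*N)` overflows when N*N exceeds sys.maxsize = 2^63 - 1 (A returns nowhere there).
def Pre_creer_grille_final (list_var : List Bool) (n : Int) : Prop :=
  ((list_var.drop ((n * n) * (n * n) * (n * n)).toNat).all (fun b => !b)) = true ∧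
  (n * n ≠ 0 ∨ (list_var.all (fun b => !b)) = true) ∧
  (n * n) * (n * n) ≤ 9223372036854775807
instance (list_var : List Bool) (n : Int) : Decidable (Pre_creer_grille_final list_var n) := by unfold Pre_creer_grille_final; infer_instance
def pvWitness_creer_grille_final : List Bool × Int := ([true], 1)

-- On inputs with a True variable at flat index ≥ N^3 (or any True when N = 0) A raises
-- (IndexError resp. ZeroDivisionError) while B ignores variables outside the grid and
-- returns the decoded grid.
def Raises_creer_grille_final (list_var : List Bool) (n : Int) : Prop :=
  (n * n) * (n * n) ≤ 9223372036854775807 ∧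
  ¬ (((list_var.drop ((n * n) * (n * n) * (n * n)).toNat).all (fun b => !b)) = true ∧
     (n * n ≠ 0 ∨ (list_var.all (fun b => !b)) = true))
instance (list_var : List Bool) (n : Int) : Decidable (Raises_creer_grille_final list_var n) := by unfold Raises_creer_grille_final; infer_instance
def pvRaiseWitness_creer_grille_final : List Bool × Int := ([true], 0)
def pvRaiseWitnessOut_creer_grille_final : List Int := []

def Spec_creer_grille_final (list_var : List Bool) (n : Int) (out : List Int) : Prop := out = creer_grille_final_alt list_var n
instance (list_var : List Bool) (n : Int) (out : List Int) : Decidable (Spec_creer_grille_final list_var n out) := by unfold Spec_creer_grille_final; infer_instance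

-- ===== CLAIM (what is proved, stated in full; the proofs are below) =====
def Claim_equal_creer_grille_final : Prop := ∀ (list_var : List Bool) (n : Int), Dom_creer_grille_final list_var n → Pre_creer_grille_final list_var n → Spec_creer_grille_final list_var n (creer_grille_final list_var n)
def Claim_raises_creer_grille_final : Prop := (∀ (list_var : List Bool) (n : Int), Dom_creer_grille_final list_var n → Raises_creer_grille_final list_var n → ¬ Pre_creer_grille_final list_var n) ∧ (Dom_creer_grille_final (pvRaiseWitness_creer_grille_final.1) (pvRaiseWitness_creer_grille_final.2) ∧ Raises_creer_grille_final (pvRaiseWitness_creer_grille_final.1) (pvRaiseWitness_creer_grille_final.2) ∧ creer_grille_final_alt (pvRaiseWitness_creer_grille_final.1) (pvRaiseWitness_creer_grille_final.2) = pvRaiseWitnessOut_creer_grille_final)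

-- ===== LEMMAS AND PROOFS =====

-- `pvLastK p Nn` = the value B's inner loop computes: k0+1 for the last k0 < Nn with p k0, else 0
def pvLastK (p : Nat → Bool) (Nn : Nat) : Int :=
  (List.range Nn).foldl (fun v k => if p k then ((k : Int) + 1) else v) 0

def pvCellVal (lv : List Bool) (Nn c : Nat) : Int :=
  pvLastK (fun k => lv.getD (c * Nn + k) false) Nn

def pvGrid (lv : List Bool) (Nn : Nat) : List Int :=
  (List.range (Nn * Nn)).map (pvCellVal lv Nn)

theorem pvLastK_congr (p q : Nat → Bool) (Nn : Nat) (h : ∀ k < Nn, p k = q k) :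
    pvLastK p Nn = pvLastK q Nn := by
  unfold pvLastK
  induction Nn with
  | zero => rfl
  | succ t ih =>
      rw [List.range_succ, List.foldl_append, List.foldl_append,
        ih (fun k hk => h k (Nat.lt_succ_of_lt hk))]
      simp [h t (Nat.lt_succ_self t)]

theorem pvLastK_false (p : Nat → Bool) (Nn : Nat) (h : ∀ k < Nn, p k = false) :
    pvLastK p Nn = 0 := by
  unfold pvLastK
  induction Nn with
  | zero => rfl
  | succ t ih =>
      rw [List.range_succ, List.foldl_append,
        ih (fun k hk => h k (Nat.lt_succ_of_lt hk))]
      simp [h t (Nat.lt_succ_self t)]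

theorem pvLastK_last (p : Nat → Bool) (Nn m : Nat) (hm : m < Nn) (hp : p m = true)
    (hafter : ∀ k, m < k → k < Nn → p k = false) :
    pvLastK p Nn = (m : Int) + 1 := by
  induction Nn with
  | zero => omega
  | succ t ih =>
      unfold pvLastK
      rw [List.range_succ, List.foldl_append]
      rcases Nat.lt_succ_iff_lt_or_eq.mp hm with h | h
      · have := ih h (fun k hk hk' => hafter k hk (Nat.lt_succ_of_lt hk'))
        unfold pvLastK at this
        rw [this]
        simp [hafter t h (Nat.lt_succ_self t)]
      · subst h; simp [hp]

theorem pv_enumerate_append (ys : List Bool) (b : Bool) :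
    ∀ s : Int, PySem.List.enumerate (ys ++ [b]) s
      = PySem.List.enumerate ys s ++ [((s + ys.length : Int), b)] := by
  induction ys with
  | nil => intro s; simp [PySem.List.enumerate]
  | cons x t ih =>
      intro s
      simp only [List.cons_append, PySem.List.enumerate, ih (s + 1), List.length_cons]
      have : s + 1 + (t.length : Int) = s + ((t.length + 1 : Nat) : Int) := by push_cast; ring
      rw [this]

theorem pv_getD_append (ys : List Bool) (b : Bool) (i : Nat) :
    (ys ++ [b]).getD i false = if i = ys.length then b else ys.getD i false := by
  by_cases h : i = ys.length
  · subst h; simp [List.getD]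
  · rw [if_neg h]
    by_cases h2 : i < ys.length
    · simp only [List.getD]
      rw [List.getElem?_append_left h2]
    · have hl : (ys ++ [b])[i]? = none := List.getElem?_eq_none (by simp; omega)
      have hr : ys[i]? = none := List.getElem?_eq_none (by omega)
      simp [List.getD, hl, hr]

theorem pv_set_map_range {M p : Nat} (f : Nat → Int) (x : Int) (hp : p < M) :
    ((List.range M).map f).set p x
      = (List.range M).map (fun c => if c = p then x else f c) := by
  apply List.ext_getElem
  · simp
  · intro i hi hi'
    simp only [List.getElem_set, List.getElem_map, List.getElem_range]
    by_cases h : p = i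
    · simp [h]
    · rw [if_neg h, if_neg (fun hh => h hh.symm)]

-- the scatter loop of A computes the gathered grid
theorem pv_scatter (Nn : Nat) :
    ∀ lv : List Bool,
      (∀ i : Nat, lv.getD i false = true → i < Nn * Nn * Nn ∧ 0 < Nn) →
      (PySem.List.enumerate lv).foldl (pvStepA (Nn : Int))
          (List.replicate (Nn * Nn) (0 : Int))
        = pvGrid lv Nn := by
  intro lv
  induction lv using List.reverseRecOn with
  | nil =>
      intro _
      have hz : ∀ c, pvCellVal [] Nn c = 0 := fun c =>
        pvLastK_false _ _ (fun k _ => by simp [List.getD])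
      have : pvGrid [] Nn = List.replicate (Nn * Nn) (0 : Int) := by
        unfold pvGrid
        rw [List.map_congr_left (fun c _ => hz c), List.map_const', List.length_range]
      rw [this]
      simp [PySem.List.enumerate]
  | append_singleton ys b ih =>
      intro h
      have hys : ∀ i : Nat, ys.getD i false = true → i < Nn * Nn * Nn ∧ 0 < Nn := by
        intro i hi
        apply h i
        rw [pv_getD_append]
        split
        · next heq =>
            exfalso
            have hlt : i < ys.length := by
              by_contra hc
              rw [List.getD_eq_default _ _ (by omega)] at hi
              exact absurd hi (by simp)
            omega
        · exact hi
      rw [pv_enumerate_append, List.foldl_append, ih hys]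
      simp only [List.foldl_cons, List.foldl_nil]
      by_cases hb : b = true
      · subst hb
        have hmlt : ys.length < Nn * Nn * Nn ∧ 0 < Nn := by
          apply h ys.length
          rw [pv_getD_append]; simp
        obtain ⟨hm3, hNpos⟩ := hmlt
        have hcell : ys.length / Nn < Nn * Nn :=
          (Nat.div_lt_iff_lt_mul hNpos).mpr (by nlinarith)
        have harith : pvStepA (Nn : Int) (pvGrid ys Nn) (((0 : Int) + ys.length), true)
            = (pvGrid ys Nn).set (ys.length / Nn) (((ys.length % Nn : Nat) : Int) + 1) := by
          unfold pvStepA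
          rw [if_pos rfl]
          have e0 : ((0 : Int) + (ys.length : Int)) = ((ys.length : Nat) : Int) := by ring
          have e1 : ((Nn : Int) * Nn) = ((Nn * Nn : Nat) : Int) := by push_cast; ring
          simp only [e0, e1, PySem.Int.mod_natCast, PySem.Int.floordiv_natCast]
          have e2 : (((ys.length / (Nn * Nn) : Nat) : Int) + 1 - 1) * (Nn : Int)
              + (((ys.length / Nn % Nn : Nat) : Int) + 1 - 1)
              = ((ys.length / (Nn * Nn) * Nn + ys.length / Nn % Nn : Nat) : Int) := by
            push_cast; ring
          rw [e2, Int.toNat_natCast]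
          have e3 : ys.length / (Nn * Nn) * Nn + ys.length / Nn % Nn = ys.length / Nn := by
            rw [← Nat.div_div_eq_div_mul, Nat.mul_comm (ys.length / Nn / Nn) Nn]
            exact Nat.div_add_mod (ys.length / Nn) Nn
          rw [e3]
        rw [harith]
        unfold pvGrid
        rw [pv_set_map_range _ _ hcell]
        apply List.map_congr_left
        intro c hc
        by_cases hcm : c = ys.length / Nn
        · subst hcm
          rw [if_pos rfl]
          unfold pvCellVal
          rw [pvLastK_last _ _ (ys.length % Nn) (Nat.mod_lt _ hNpos)]
          · rw [pv_getD_append, if_pos]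
            rw [Nat.mul_comm (ys.length / Nn) Nn]
            exact Nat.div_add_mod ys.length Nn
          · intro k hk hk'
            rw [pv_getD_append]
            have hdm := Nat.div_add_mod ys.length Nn
            rw [if_neg (by intro heq; nlinarith)]
            apply List.getD_eq_default
            nlinarith
        · rw [if_neg hcm]
          unfold pvCellVal
          apply pvLastK_congr
          intro k hk
          rw [pv_getD_append, if_neg]
          intro heq
          apply hcm
          have : (Nn * c + k) / Nn = ys.length / Nn := by
            rw [Nat.mul_comm Nn c] at *
            rw [heq]
          rw [Nat.mul_add_div hNpos, Nat.div_eq_of_lt hk, Nat.add_zero] at this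
          exact this.symm ▸ rfl
      · have hb' : b = false := by cases b; rfl; exact absurd rfl hb
        subst hb'
        have hstep : pvStepA (Nn : Int) (pvGrid ys Nn) (((0 : Int) + ys.length), false)
            = pvGrid ys Nn := by
          unfold pvStepA; simp
        rw [hstep]
        unfold pvGrid
        apply List.map_congr_left
        intro c _
        unfold pvCellVal
        apply pvLastK_congr
        intro k hk
        rw [pv_getD_append]
        split
        · next heq => rw [List.getD_eq_default _ _ (le_of_eq heq.symm)]
        · rfl

theorem pv_pyRange_one_shift (Nn : Nat) :
    PySem.List.pyRange 1 ((Nn : Int) + 1) = (List.range Nn).map (fun k : Nat => (k : Int) + 1) := by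
  induction Nn with
  | zero => simp [PySem.List.pyRange_one_eq_nil]
  | succ t ih =>
      rw [show ((t + 1 : Nat) : Int) + 1 = ((t : Int) + 1) + 1 by push_cast; ring,
        PySem.List.pyRange_one_succ_right (by omega), ih, List.range_succ]
      simp

-- pointwise-equal fold functions fold alike
theorem pv_foldl_ext {α β : Type} {f g : α → β → α} (h : ∀ a b, f a b = g a b)
    (a : α) (l : List β) : l.foldl f a = l.foldl g a := by
  have hfg : f = g := funext fun x => funext fun y => h x y
  rw [hfg]

-- scanning only the existing slots computes the same last-true value
theorem pvLastK_trunc (p : Nat → Bool) (Nn m : Nat) (hm : m ≤ Nn)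
    (h : ∀ k, m ≤ k → k < Nn → p k = false) :
    pvLastK p Nn = pvLastK p m := by
  induction Nn with
  | zero => interval_cases m; rfl
  | succ t ih =>
      by_cases hmt : m = t + 1
      · rw [hmt]
      · have hmle : m ≤ t := by omega
        unfold pvLastK
        rw [List.range_succ, List.foldl_append]
        have := ih hmle (fun k hk hk' => h k hk (Nat.lt_succ_of_lt hk'))
        unfold pvLastK at this
        rw [this]
        simp [h t hmle (Nat.lt_succ_self t)]

-- B's inner loop over the existing slots of an occupied cell = the cell's gathered value
theorem pv_inner_eq_cellVal (lv : List Bool) (Nn c : Nat) (hb : c * Nn < lv.length) :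
    (PySem.List.pyRange 1 (min ((Nn : Nat) : Int) (((lv.length : Nat) : Int) - ((c : Nat) : Int) * ((Nn : Nat) : Int)) + 1)).foldl
      (fun v k => if PySem.List.pyGetD lv (((c : Nat) : Int) * ((Nn : Nat) : Int) + k - 1) false then k else v) 0
    = pvCellVal lv Nn c := by
  have hmin : min ((Nn : Nat) : Int) (((lv.length : Nat) : Int) - ((c : Nat) : Int) * ((Nn : Nat) : Int))
      = ((min Nn (lv.length - c * Nn) : Nat) : Int) := by
    rw [Nat.cast_min, Nat.cast_sub (Nat.le_of_lt hb)]
    push_cast; ring_nf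
  rw [hmin, pv_pyRange_one_shift, List.foldl_map]
  unfold pvCellVal
  rw [pvLastK_trunc _ Nn (min Nn (lv.length - c * Nn)) (Nat.min_le_left _ _)
    (fun k hk hk' => List.getD_eq_default _ _ (by omega))]
  unfold pvLastK
  apply pv_foldl_ext
  intro v k
  show (if PySem.List.pyGetD lv (((c : Nat) : Int) * ((Nn : Nat) : Int) + ((k : Int) + 1) - 1) false
        then (k : Int) + 1 else v)
      = (if lv.getD (c * Nn + k) false then (k : Int) + 1 else v)
  have e : ((c : Nat) : Int) * ((Nn : Nat) : Int) + ((k : Int) + 1) - 1 = ((c * Nn + k : Nat) : Int) := by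
    push_cast; ring
  rw [e, PySem.List.pyGetD_natCast]

-- B's while loop emits the gathered values of the cells [cell, cell+remaining)
theorem pv_bloop_eq (lv : List Bool) (Nn : Nat) :
    ∀ (remaining cell : Nat),
      pvBLoop lv ((Nn : Nat) : Int) ((lv.length : Nat) : Int) cell remaining
        = (List.range' cell remaining).map (pvCellVal lv Nn) := by
  intro remaining
  induction remaining with
  | zero => intro cell; rfl
  | succ r ih =>
      intro cell
      unfold pvBLoop
      by_cases hb : ((cell : Nat) : Int) * ((Nn : Nat) : Int) < ((lv.length : Nat) : Int)
      · rw [if_pos hb, ih (cell + 1), List.range'_succ, List.map_cons]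
        have hbn : cell * Nn < lv.length := by exact_mod_cast hb
        rw [pv_inner_eq_cellVal lv Nn cell hbn]
      · rw [if_neg hb]
        have hbn : lv.length ≤ cell * Nn := by
          have : ¬ (cell * Nn < lv.length) := fun hlt => hb (by exact_mod_cast hlt)
          omega
        have hz : ∀ c ∈ List.range' cell (r + 1), pvCellVal lv Nn c = 0 := by
          intro c hc
          have hge : cell ≤ c := (List.mem_range'_1.mp hc).1
          exact pvLastK_false _ _ (fun k _ =>
            List.getD_eq_default _ _ (le_trans hbn (by nlinarith)))
        rw [List.map_congr_left hz, List.map_const', List.length_range']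

-- B's port equals the gathered grid
theorem pv_alt_eq_grid (lv : List Bool) (n : Int) :
    creer_grille_final_alt lv n = pvGrid lv (n * n).toNat := by
  have hN : (n * n : Int) = (((n * n).toNat : Nat) : Int) :=
    (Int.toNat_of_nonneg (mul_self_nonneg n)).symm
  set Nn := (n * n).toNat with hNn
  unfold creer_grille_final_alt pvGrid
  simp only [hN]
  rw [show (((Nn : Nat) : Int) * ((Nn : Nat) : Int)).toNat = Nn * Nn by
      rw [show ((Nn : Nat) : Int) * ((Nn : Nat) : Int) = ((Nn * Nn : Nat) : Int) by push_cast; ring,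
        Int.toNat_natCast]]
  rw [pv_bloop_eq lv Nn (Nn * Nn) 0, List.range_eq_range']

theorem creer_grille_final_spec : Claim_equal_creer_grille_final := by
  intro lv n _ hpre
  unfold Spec_creer_grille_final
  rw [pv_alt_eq_grid]
  have hN : (n * n : Int) = (((n * n).toNat : Nat) : Int) :=
    (Int.toNat_of_nonneg (mul_self_nonneg n)).symm
  set Nn := (n * n).toNat with hNn
  obtain ⟨h1, h2, -⟩ := hpre
  have hcube : ((n * n) * (n * n) * (n * n)).toNat = Nn * Nn * Nn := by
    rw [hN, ← Nat.cast_mul, ← Nat.cast_mul, Int.toNat_natCast]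
  rw [hcube] at h1
  unfold creer_grille_final
  simp only [hN]
  apply pv_scatter
  intro i hi
  have hlen : i < lv.length := by
    by_contra hc
    rw [List.getD_eq_default _ _ (by omega)] at hi
    exact absurd hi (by simp)
  have hval : lv[i] = true := by
    simpa [List.getD, List.getElem?_eq_getElem hlen] using hi
  have hN3 : i < Nn * Nn * Nn := by
    by_contra hc
    have hidx : i - Nn * Nn * Nn < (lv.drop (Nn * Nn * Nn)).length := by
      rw [List.length_drop]; omega
    have hmem : lv[i] ∈ lv.drop (Nn * Nn * Nn) := by
      have he : (lv.drop (Nn * Nn * Nn))[i - Nn * Nn * Nn]'hidx = lv[i] := by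
        rw [List.getElem_drop]
        congr 1; omega
      exact he ▸ List.getElem_mem hidx
    have := List.all_eq_true.mp h1 _ hmem
    rw [hval] at this
    exact absurd this (by simp)
  refine ⟨hN3, ?_⟩
  rcases h2 with h2 | h2
  · have : Nn ≠ 0 := by
      intro h0
      apply h2
      rw [hN, h0]; rfl
    omega
  · have := List.all_eq_true.mp h2 _ (lv.getElem_mem hlen)
    rw [hval] at this
    exact absurd this (by simp)

@[simp] theorem creer_grille_final_raises : Claim_raises_creer_grille_final := by
  unfold Claim_raises_creer_grille_final
  refine ⟨fun _ _ _ hr hpre => hr.2 ⟨hpre.1, hpre.2.1⟩, by decide⟩
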